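-- pv_equiv track=rewrite | github.com/tajo9128/BioDockify-Pharma-AI | plugins/_office/helpers/artifact_editor.py | _trim_blank_edges
-- ===== SOURCE A (Python) =====
-- from typing import Any
--
-- def _trim_blank_edges(rows: list[list[Any]]) -> list[list[Any]]:
--     trimmed = []
--     for row in rows:
--         next_row = list(row)
--         while next_row and not _cell_has_content(next_row[-1]):
--             next_row.pop()
--         trimmed.append(next_row)
--     while trimmed and not _row_has_content(trimmed[-1]):
--         trimmed.pop()
--     return trimmed
--
-- def _cell_has_content(value: Any) -> bool:
--     if value is None:
--         return False
--     if isinstance(value, str):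
--         return bool(value.strip())
--     return True
--
-- def _row_has_content(row: list[Any]) -> bool:
--     return any(_cell_has_content(value) for value in row)
-- ===== SOURCE B (Python) =====
-- from typing import Any
--
-- def _rtrim(items, has):
--     i = len(items)
--     while i and not has(items[i - 1]):
--         i -= 1
--     return items[:i]
--
-- def _cell_has_content(value: Any) -> bool:
--     if value is None:
--         return False
--     if isinstance(value, str):
--         return bool(value.strip())
--     return True
--
-- def _row_has_content(row: list[Any]) -> bool:
--     return any(_cell_has_content(value) for value in row)
--
-- def _trim_blank_edges(rows: list[list[Any]]) -> list[list[Any]]: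
--     trimmed = [_rtrim(row, _cell_has_content) for row in rows]
--     return _rtrim(trimmed, _row_has_content)
-- ===== Notes on version B (the rewrite author's own statement) =====
-- stated objective: simpler
-- what changed: Replaces the mutate-copy-and-pop loops with a backward boundary-index scan plus a single slice per row (and for the row list), built with a comprehension instead of an accumulator.
import Mathlib
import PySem

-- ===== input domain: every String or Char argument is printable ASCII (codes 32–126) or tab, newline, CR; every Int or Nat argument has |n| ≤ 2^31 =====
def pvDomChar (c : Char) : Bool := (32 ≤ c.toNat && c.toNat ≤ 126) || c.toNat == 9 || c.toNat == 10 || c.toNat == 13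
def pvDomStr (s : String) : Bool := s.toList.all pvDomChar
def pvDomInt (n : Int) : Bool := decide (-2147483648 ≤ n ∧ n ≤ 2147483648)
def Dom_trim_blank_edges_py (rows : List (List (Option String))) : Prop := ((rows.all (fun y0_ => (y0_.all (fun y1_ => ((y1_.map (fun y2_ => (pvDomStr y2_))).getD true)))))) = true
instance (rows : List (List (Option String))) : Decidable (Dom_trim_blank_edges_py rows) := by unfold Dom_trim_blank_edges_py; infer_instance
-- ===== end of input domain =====

-- B replaces A's copy-and-pop while-loops by a backward boundary-index scan plus one slice
-- per list (objective: simpler). A does not mutate its argument (it pops from copies), so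
-- return-value equivalence is the whole story.

-- ===== PORT A =====
-- _cell_has_content: None → False; str → bool(value.strip()) (here cells are Option String)
def cellHasContent_py (value : Option String) : Bool :=
  match value with
  | none => false
  | some s => !(PySem.Str.strip s == "")

-- _row_has_content: any(_cell_has_content(v) for v in row)
def rowHasContent_py (row : List (Option String)) : Bool :=
  row.any cellHasContent_py

-- the `while xs and not has(xs[-1]): xs.pop()` loop of A, as recursion on dropLast
def popTrail_py {α : Type} (has : α → Bool) (xs : List α) : List α :=
  match h : xs.getLast? with
  | none => xs
  | some v => if has v then xs else popTrail_py has xs.dropLast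
termination_by xs.length
decreasing_by
  have hne : xs ≠ [] := by intro e; subst e; simp at h
  have : 0 < xs.length := List.length_pos_iff.mpr hne
  simp [List.length_dropLast]; omega

def trim_blank_edges_py (rows : List (List (Option String))) : List (List (Option String)) :=
  let trimmed := rows.foldl (fun acc row => acc ++ [popTrail_py cellHasContent_py row]) []
  popTrail_py rowHasContent_py trimmed

-- ===== PORT B =====
-- the `i = len(items); while i and not has(items[i-1]): i -= 1` loop of B
def rtrimIdx_py {α : Type} (has : α → Bool) (items : List α) (d : α) : Nat → Nat
  | 0 => 0
  | i + 1 => if has (items.getD i d) then i + 1 else rtrimIdx_py has items d i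

-- items[:i]
def rtrim_py {α : Type} (has : α → Bool) (d : α) (items : List α) : List α :=
  items.take (rtrimIdx_py has items d items.length)

def cellHasContent_alt (value : Option String) : Bool :=
  match value with
  | none => false
  | some s => !(PySem.Str.strip s == "")

def rowHasContent_alt (row : List (Option String)) : Bool :=
  row.any cellHasContent_alt

def trim_blank_edges_py_alt (rows : List (List (Option String))) : List (List (Option String)) :=
  rtrim_py rowHasContent_alt [] (rows.map (rtrim_py cellHasContent_alt none))

-- ===== PRECONDITION & SPEC =====
def Spec_trim_blank_edges_py (rows : List (List (Option String))) (out : List (List (Option String))) : Prop := out = trim_blank_edges_py_alt rows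
instance (rows : List (List (Option String))) (out : List (List (Option String))) : Decidable (Spec_trim_blank_edges_py rows out) := by unfold Spec_trim_blank_edges_py; infer_instance

-- ===== CLAIM (what is proved, stated in full; the proofs are below) =====
def Claim_equal_trim_blank_edges_py : Prop := ∀ (rows : List (List (Option String))), Dom_trim_blank_edges_py rows → Spec_trim_blank_edges_py rows (trim_blank_edges_py rows)

-- ===== LEMMAS AND PROOFS =====

theorem rtrimIdx_le {α : Type} (has : α → Bool) (items : List α) (d : α) :
    ∀ i, rtrimIdx_py has items d i ≤ i := by
  intro i
  induction i with
  | zero => simp [rtrimIdx_py]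
  | succ i ih =>
    simp only [rtrimIdx_py]
    split
    · exact le_refl _
    · omega

theorem popTrail_append {α : Type} (has : α → Bool) (xs : List α) (a : α) :
    popTrail_py has (xs ++ [a]) = if has a then xs ++ [a] else popTrail_py has xs := by
  rw [popTrail_py]
  split
  · rename_i h
    simp at h
  · rename_i v h
    rw [List.getLast?_concat] at h
    cases h
    simp [List.dropLast_concat]

theorem rtrimIdx_append {α : Type} (has : α → Bool) (xs : List α) (a : α) (d : α) :
    ∀ i, i ≤ xs.length → rtrimIdx_py has (xs ++ [a]) d i = rtrimIdx_py has xs d i := by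
  intro i
  induction i with
  | zero => simp [rtrimIdx_py]
  | succ i ih =>
    intro hle
    have hi : i < xs.length := by omega
    simp only [rtrimIdx_py, List.getD, List.getElem?_append_left hi]
    split
    · rfl
    · exact ih (by omega)

theorem popTrail_eq_rtrim {α : Type} (has : α → Bool) (d : α) (xs : List α) :
    popTrail_py has xs = rtrim_py has d xs := by
  induction xs using List.reverseRecOn with
  | nil => simp [popTrail_py, rtrim_py, rtrimIdx_py]
  | append_singleton xs a ih =>
    rw [popTrail_append]
    unfold rtrim_py
    rw [List.length_append, List.length_singleton]
    simp only [rtrimIdx_py]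
    have hget : (xs ++ [a]).getD xs.length d = a := by
      simp [List.getD]
    rw [hget]
    by_cases ha : has a
    · simp [ha]
    · simp only [ha, if_neg, Bool.false_eq_true, not_false_iff]
      rw [rtrimIdx_append has xs a d xs.length (le_refl _)]
      have hle := rtrimIdx_le has xs d xs.length
      rw [List.take_append_of_le_length hle]
      exact ih

theorem foldl_append_map {α β : Type} (f : α → β) :
    ∀ (xs : List α) (acc : List β),
      xs.foldl (fun acc row => acc ++ [f row]) acc = acc ++ xs.map f := by
  intro xs
  induction xs with
  | nil => simp
  | cons x xs ih => intro acc; simp [List.foldl, ih]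

-- ===== VERDICT (by name: the statement is the Claim_ definition above) =====
theorem trim_blank_edges_py_spec : Claim_equal_trim_blank_edges_py := by
  intro rows _
  unfold Spec_trim_blank_edges_py trim_blank_edges_py trim_blank_edges_py_alt
  have hcell : cellHasContent_py = cellHasContent_alt := rfl
  have hrow : rowHasContent_py = rowHasContent_alt := rfl
  rw [foldl_append_map]
  simp only [List.nil_append]
  rw [popTrail_eq_rtrim rowHasContent_py ([] : List (Option String)) , hcell, hrow]
  congr 1
  exact List.map_congr_left (fun x _ => popTrail_eq_rtrim cellHasContent_alt none x)
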